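-- pv_equiv track=rewrite | github.com/aasishtammana/Artificial-Intelligence | Project 3/3.logicagent/3.logicagent/wumpus_kb.py | axiom_generator_percept_sentence
-- ===== SOURCE A (Python) =====
-- def percept_stench_str(t):
--     "A Stench is perceived at time <t>"
--     return 'Stench{0}'.format(t)
--
-- def percept_breeze_str(t):
--     "A Breeze is perceived at time <t>"
--     return 'Breeze{0}'.format(t)
--
-- def percept_glitter_str(t):
--     "A Glitter is perceived at time <t>"
--     return 'Glitter{0}'.format(t)
--
-- def percept_bump_str(t):
--     "A Bump is perceived at time <t>"
--     return 'Bump{0}'.format(t)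
--
-- def percept_scream_str(t):
--     "A Scream is perceived at time <t>"
--     return 'Scream{0}'.format(t)
--
-- def axiom_generator_percept_sentence(t, tvec):
--     """
--     Asserts that each percept proposition is True or False at time t.
--
--     t := time
--     tvec := a boolean (True/False) vector with entries corresponding to
--             percept propositions, in this order:
--                 (<stench>,<breeze>,<glitter>,<bump>,<scream>)
--
--     Example:
--         Input:  [False, True, False, False, True]
--         Output: '~Stench0 & Breeze0 & ~Glitter0 & ~Bump0 & Scream0'
--     """
--     axiom_str = ''
--     "*** YOUR CODE HERE ***"
--     for i in range(len(tvec)):#Iterate over the given vector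
--             if tvec[i]==True:#If any of the percepts are true add them directly with and
--                 if i==0:
--                     axiom_str+=percept_stench_str(t)#Adding Stench Percept
--                 if i==1:
--                     axiom_str+=' & '+ percept_breeze_str(t)#Adding Breeze Percept with & to the previous axiom string
--                 if i==2:
--                     axiom_str+=' & '+ percept_glitter_str(t)#Adding Glitter Percept with & to the previous axiom string
--                 if i==3:
--                     axiom_str+=' & '+ percept_bump_str(t)#Adding Bump Percept with & to the previous axiom string
--                 if i==4:
--                     axiom_str+=' & '+ percept_scream_str(t)#Adding Scream Percept with & to the previous axiom string
--             else:#If any of the percepts is not true,it implies it is false and we add them with negation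
--                 if i==0:
--                     axiom_str+='~'+ percept_stench_str(t)#Adding negation of Stench Percept
--                 if i==1:
--                     axiom_str+=' & ~'+ percept_breeze_str(t)#Adding negation of Breeze Percept with & to the previous axiom string
--                 if i==2:
--                     axiom_str+=' & ~'+ percept_glitter_str(t)#Adding negation of Glitter Percept with & to the previous axiom string
--                 if i==3:
--                     axiom_str+=' & ~'+ percept_bump_str(t)#Adding negation of Bump Percept with & to the previous axiom string
--                 if i==4:
--                     axiom_str+=' & ~'+ percept_scream_str(t)#Adding negation of Scream Percept with & to the previous axiom string
--     # Comment or delete the next line once this function has been implemented.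
--     return axiom_str
-- ===== SOURCE B (Python) =====
-- def axiom_generator_percept_sentence(t, tvec):
--     names = ('Stench', 'Breeze', 'Glitter', 'Bump', 'Scream')
--     n = min(len(names), len(tvec))
--
--     def build(i):
--         # builds the conjunction for positions i..n-1, tail first (back-to-front)
--         term = ('' if tvec[i] == True else '~') + names[i] + str(t)
--         return term if i + 1 >= n else term + ' & ' + build(i + 1)
--
--     return '' if n == 0 else build(0)
-- ===== Notes on version B (the rewrite author's own statement) =====
-- stated objective: faster
-- what changed: Replaces A's forward index loop over all of tvec with a growing accumulator string and a positional five-way if-ladder that hand-manages ' & ' separators by a back-to-front recursion: B computes n = min(5, len(tvec)) up front and build(i) emits the (possibly negated) i-th percept name and prepends it to ' & ' plus the recursively built rest; recursion stops at n, so B does constant work beyond the first five entries while A iterates over every index of tvec.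
import Mathlib
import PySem

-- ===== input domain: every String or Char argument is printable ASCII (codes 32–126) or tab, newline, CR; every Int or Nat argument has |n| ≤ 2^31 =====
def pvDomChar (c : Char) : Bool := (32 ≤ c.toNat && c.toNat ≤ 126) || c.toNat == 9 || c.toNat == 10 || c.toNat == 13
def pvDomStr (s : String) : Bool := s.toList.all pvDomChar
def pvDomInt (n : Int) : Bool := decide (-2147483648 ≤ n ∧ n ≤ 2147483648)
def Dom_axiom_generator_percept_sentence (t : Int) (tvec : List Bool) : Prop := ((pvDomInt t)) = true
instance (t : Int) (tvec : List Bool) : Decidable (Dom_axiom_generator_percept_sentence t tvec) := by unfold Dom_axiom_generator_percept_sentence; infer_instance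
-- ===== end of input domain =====

-- B replaces A's forward index loop with accumulator and hand-managed ' & ' separators by a
-- back-to-front recursion over the first min(5, len(tvec)) positions (objective: alternative).

-- ===== PORT A =====
def pvPerceptStench (t : Int) : String := "Stench" ++ PySem.Int.toStr t
def pvPerceptBreeze (t : Int) : String := "Breeze" ++ PySem.Int.toStr t
def pvPerceptGlitter (t : Int) : String := "Glitter" ++ PySem.Int.toStr t
def pvPerceptBump (t : Int) : String := "Bump" ++ PySem.Int.toStr t
def pvPerceptScream (t : Int) : String := "Scream" ++ PySem.Int.toStr t

-- the body of A's for-loop over i (tvec[i] is always in range, so pyGetD is exact here)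
def pvStepA (t : Int) (tvec : List Bool) (axiom_str : String) (i : Int) : String :=
  if PySem.List.pyGetD tvec i false == true then
    let s := if i = 0 then axiom_str ++ pvPerceptStench t else axiom_str
    let s := if i = 1 then s ++ (" & " ++ pvPerceptBreeze t) else s
    let s := if i = 2 then s ++ (" & " ++ pvPerceptGlitter t) else s
    let s := if i = 3 then s ++ (" & " ++ pvPerceptBump t) else s
    let s := if i = 4 then s ++ (" & " ++ pvPerceptScream t) else s
    s
  else
    let s := if i = 0 then axiom_str ++ ("~" ++ pvPerceptStench t) else axiom_str
    let s := if i = 1 then s ++ (" & ~" ++ pvPerceptBreeze t) else s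
    let s := if i = 2 then s ++ (" & ~" ++ pvPerceptGlitter t) else s
    let s := if i = 3 then s ++ (" & ~" ++ pvPerceptBump t) else s
    let s := if i = 4 then s ++ (" & ~" ++ pvPerceptScream t) else s
    s

def axiom_generator_percept_sentence (t : Int) (tvec : List Bool) : String :=
  (PySem.List.pyRange 0 (PySem.List.len tvec) 1).foldl (pvStepA t tvec) ""

-- ===== PORT B =====
def pvNamesB : List String := ["Stench", "Breeze", "Glitter", "Bump", "Scream"]

-- B's inner recursive build(i): term for position i, then ' & ' ++ the rest built recursively
def pvBuildB (t : Int) (tvec : List Bool) (n : Nat) (i : Nat) : String :=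
  let term := (if PySem.List.pyGetD tvec (i : Int) false == true then "" else "~")
              ++ PySem.List.pyGetD pvNamesB (i : Int) "" ++ PySem.Int.toStr t
  if i + 1 ≥ n then term else term ++ " & " ++ pvBuildB t tvec n (i + 1)
termination_by n - i
decreasing_by omega

def axiom_generator_percept_sentence_alt (t : Int) (tvec : List Bool) : String :=
  let n := min pvNamesB.length tvec.length
  if n = 0 then "" else pvBuildB t tvec n 0

-- ===== PRECONDITION & SPEC =====
def Spec_axiom_generator_percept_sentence (t : Int) (tvec : List Bool) (out : String) : Prop := out = axiom_generator_percept_sentence_alt t tvec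
instance (t : Int) (tvec : List Bool) (out : String) : Decidable (Spec_axiom_generator_percept_sentence t tvec out) := by unfold Spec_axiom_generator_percept_sentence; infer_instance

-- ===== CLAIM (what is proved, stated in full; the proofs are below) =====
def Claim_equal_axiom_generator_percept_sentence : Prop := ∀ (t : Int) (tvec : List Bool), Dom_axiom_generator_percept_sentence t tvec → Spec_axiom_generator_percept_sentence t tvec (axiom_generator_percept_sentence t tvec)

-- ===== LEMMAS AND PROOFS =====

-- A's loop body does nothing for indices ≥ 5
theorem pvStepA_id (t : Int) (tvec : List Bool) (s : String) (i : Int) (h : 5 ≤ i) :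
    pvStepA t tvec s i = s := by
  unfold pvStepA
  split_ifs <;> first | rfl | omega

theorem pvFoldlStepA_id (t : Int) (tvec : List Bool) (l : List Int)
    (h : ∀ i ∈ l, 5 ≤ i) : ∀ s, l.foldl (pvStepA t tvec) s = s := by
  induction l with
  | nil => intro s; rfl
  | cons x xs ih =>
      intro s
      simp only [List.foldl_cons, pvStepA_id t tvec s x (h x (by simp))]
      exact ih (fun i hi => h i (by simp [hi])) s

-- ===== VERDICT (by name: the statement is the Claim_ definition above) =====
set_option maxHeartbeats 2000000 in
theorem axiom_generator_percept_sentence_spec : Claim_equal_axiom_generator_percept_sentence := by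
  intro t tvec _
  show axiom_generator_percept_sentence t tvec = axiom_generator_percept_sentence_alt t tvec
  rcases tvec with _ | ⟨b0, _ | ⟨b1, _ | ⟨b2, _ | ⟨b3, _ | ⟨b4, rest⟩⟩⟩⟩⟩
  · rfl
  · cases b0 <;>
      (rw [← String.toList_inj];
       simp [axiom_generator_percept_sentence, axiom_generator_percept_sentence_alt,
            pvBuildB, pvNamesB, String.toList_append,
            pvStepA, pvPerceptStench, pvPerceptBreeze, pvPerceptGlitter, pvPerceptBump,
            pvPerceptScream, PySem.List.pyGetD_ofNat', List.getD, PySem.List.len,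
            show PySem.List.pyRange 0 1 1 = [0] from by decide])
  · cases b0 <;> cases b1 <;>
      (rw [← String.toList_inj];
       simp [axiom_generator_percept_sentence, axiom_generator_percept_sentence_alt,
            pvBuildB, pvNamesB, String.toList_append,
            pvStepA, pvPerceptStench, pvPerceptBreeze, pvPerceptGlitter, pvPerceptBump,
            pvPerceptScream, PySem.List.pyGetD_ofNat', List.getD, PySem.List.len,
            show PySem.List.pyRange 0 2 1 = [0, 1] from by decide, String.append_assoc])
  · cases b0 <;> cases b1 <;> cases b2 <;>
      (rw [← String.toList_inj];
       simp [axiom_generator_percept_sentence, axiom_generator_percept_sentence_alt,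
            pvBuildB, pvNamesB, String.toList_append,
            pvStepA, pvPerceptStench, pvPerceptBreeze, pvPerceptGlitter, pvPerceptBump,
            pvPerceptScream, PySem.List.pyGetD_ofNat', List.getD, PySem.List.len,
            show PySem.List.pyRange 0 3 1 = [0, 1, 2] from by decide, String.append_assoc])
  · cases b0 <;> cases b1 <;> cases b2 <;> cases b3 <;>
      (rw [← String.toList_inj];
       simp [axiom_generator_percept_sentence, axiom_generator_percept_sentence_alt,
            pvBuildB, pvNamesB, String.toList_append,
            pvStepA, pvPerceptStench, pvPerceptBreeze, pvPerceptGlitter, pvPerceptBump,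
            pvPerceptScream, PySem.List.pyGetD_ofNat', List.getD, PySem.List.len,
            show PySem.List.pyRange 0 4 1 = [0, 1, 2, 3] from by decide, String.append_assoc])
  · -- length ≥ 5: split the range at 5; the tail of A's loop is the identity
    have hsplit : PySem.List.pyRange 0 (PySem.List.len (b0 :: b1 :: b2 :: b3 :: b4 :: rest)) 1
        = PySem.List.pyRange 0 5 1 ++ PySem.List.pyRange 5 (PySem.List.len (b0 :: b1 :: b2 :: b3 :: b4 :: rest)) 1 := by
      apply PySem.List.pyRange_one_append <;> simp [PySem.List.len_eq] <;> omega
    have htail : ∀ s, (PySem.List.pyRange 5 (PySem.List.len (b0 :: b1 :: b2 :: b3 :: b4 :: rest)) 1).foldl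
        (pvStepA t (b0 :: b1 :: b2 :: b3 :: b4 :: rest)) s = s := by
      intro s
      exact pvFoldlStepA_id t _ _ (fun i hi => (PySem.List.mem_pyRange_one.mp hi).1) s
    rw [show axiom_generator_percept_sentence t (b0 :: b1 :: b2 :: b3 :: b4 :: rest)
          = ((PySem.List.pyRange 0 (PySem.List.len (b0 :: b1 :: b2 :: b3 :: b4 :: rest)) 1).foldl
              (pvStepA t (b0 :: b1 :: b2 :: b3 :: b4 :: rest)) "") from rfl,
        hsplit, List.foldl_append, htail,
        show PySem.List.pyRange 0 5 1 = [0, 1, 2, 3, 4] from by decide]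
    cases b0 <;> cases b1 <;> cases b2 <;> cases b3 <;> cases b4 <;>
      (rw [← String.toList_inj];
       simp [axiom_generator_percept_sentence_alt, pvBuildB, pvNamesB, String.toList_append,
            pvStepA, pvPerceptStench, pvPerceptBreeze, pvPerceptGlitter, pvPerceptBump,
            pvPerceptScream, PySem.List.pyGetD_ofNat', List.getD, PySem.List.len,
            String.append_assoc])
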